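-- pv_equiv track=rewrite | github.com/LukhasAI/Lukhas | ethics/seedra/seedra_core/reasoning_validator.py | _statements_consistent
-- ===== SOURCE A (Python) =====
-- def _statements_consistent(statement1: str, statement2: str) -> bool:
--     """Check if two statements are logically consistent."""
--     # Simplified consistency check
--     s1_words = set(statement1.lower().split())
--     s2_words = set(statement2.lower().split())
--
--     # Check for direct contradictions
--     contradictory_pairs = [
--         ("ethical", "unethical"), ("acceptable", "unacceptable"),
--         ("should", "should not"), ("allowed", "prohibited")
--     ]
--
--     for pos, neg in contradictory_pairs:
--         if pos in s1_words and neg in s2_words: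
--             return False
--         if neg in s1_words and pos in s2_words:
--             return False
--
--     return True
-- ===== SOURCE B (Python) =====
-- # Bidirectional opposite-word dict, one pass over statement1's words with O(1) lookups,
-- # instead of scanning a fixed pair list with cross-membership checks in both directions.
-- _OPPOSITE = {
--     "ethical": "unethical", "unethical": "ethical",
--     "acceptable": "unacceptable", "unacceptable": "acceptable",
--     "should": "should not", "should not": "should",
--     "allowed": "prohibited", "prohibited": "allowed",
-- }
--
-- def _statements_consistent(statement1: str, statement2: str) -> bool:
--     """Check if two statements are logically consistent."""
--     s2_words = set(statement2.lower().split())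
--     for word in statement1.lower().split():
--         opposite = _OPPOSITE.get(word)
--         if opposite is not None and opposite in s2_words:
--             return False
--     return True
-- ===== Notes on version B (the rewrite author's own statement) =====
-- stated objective: simpler
-- what changed: Replaces A's scan of a fixed contradictory-pair list with cross-membership checks in both directions by a bidirectional opposite-word dict and a single pass over statement1's words with O(1) lookups against statement2's word set.
import Mathlib
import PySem

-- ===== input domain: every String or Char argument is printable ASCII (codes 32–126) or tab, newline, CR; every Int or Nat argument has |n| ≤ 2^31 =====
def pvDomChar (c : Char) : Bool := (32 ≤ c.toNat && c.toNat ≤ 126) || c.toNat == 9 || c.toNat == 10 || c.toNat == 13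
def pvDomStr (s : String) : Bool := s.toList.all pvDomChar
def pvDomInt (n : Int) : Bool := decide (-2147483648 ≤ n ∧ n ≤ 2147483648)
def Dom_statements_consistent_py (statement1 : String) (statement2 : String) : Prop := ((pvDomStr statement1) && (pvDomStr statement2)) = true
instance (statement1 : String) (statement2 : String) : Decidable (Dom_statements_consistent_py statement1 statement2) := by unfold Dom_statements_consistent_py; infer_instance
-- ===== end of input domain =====

-- B replaces A's scan of a fixed pair list (with cross-membership checks in both directions)
-- by a bidirectional opposite-word dict and one pass over statement1's words; objective: simpler.

-- ===== PORT A =====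
def pvPairsA : List (String × String) :=
  [("ethical", "unethical"), ("acceptable", "unacceptable"),
   ("should", "should not"), ("allowed", "prohibited")]

def statements_consistent_py (statement1 : String) (statement2 : String) : Bool :=
  let s1_words : PySem.Set String := PySem.Set.ofList (PySem.Str.split₀ (PySem.Str.lower statement1))
  let s2_words : PySem.Set String := PySem.Set.ofList (PySem.Str.split₀ (PySem.Str.lower statement2))
  -- the for-loop with early 'return False' is the any over the literal pair list
  !(pvPairsA.any fun pn =>
      (PySem.Set.contains s1_words pn.1 && PySem.Set.contains s2_words pn.2) ||
      (PySem.Set.contains s1_words pn.2 && PySem.Set.contains s2_words pn.1))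

-- ===== PORT B =====
def pvOpposite : PySem.Dict String String :=
  PySem.Dict.ofList
    [("ethical", "unethical"), ("unethical", "ethical"),
     ("acceptable", "unacceptable"), ("unacceptable", "acceptable"),
     ("should", "should not"), ("should not", "should"),
     ("allowed", "prohibited"), ("prohibited", "allowed")]

def statements_consistent_py_alt (statement1 : String) (statement2 : String) : Bool :=
  let s2_words : PySem.Set String := PySem.Set.ofList (PySem.Str.split₀ (PySem.Str.lower statement2))
  -- the for-loop over statement1's words with early 'return False' is the any
  !((PySem.Str.split₀ (PySem.Str.lower statement1)).any fun word =>
      match PySem.Dict.get? pvOpposite word with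
      | some opposite => PySem.Set.contains s2_words opposite
      | none => false)

-- ===== PRECONDITION & SPEC =====
def Spec_statements_consistent_py (statement1 : String) (statement2 : String) (out : Bool) : Prop := out = statements_consistent_py_alt statement1 statement2
instance (statement1 : String) (statement2 : String) (out : Bool) : Decidable (Spec_statements_consistent_py statement1 statement2 out) := by unfold Spec_statements_consistent_py; infer_instance

-- ===== CLAIM (what is proved, stated in full; the proofs are below) =====
def Claim_equal_statements_consistent_py : Prop := ∀ (statement1 : String) (statement2 : String), Dom_statements_consistent_py statement1 statement2 → Spec_statements_consistent_py statement1 statement2 (statements_consistent_py statement1 statement2)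

-- ===== LEMMAS AND PROOFS =====

-- the dict literal's association list (for rewriting get? on a symbolic key)
lemma pvOpposite_eq : pvOpposite = PySem.Dict.mk
    [("ethical", "unethical"), ("unethical", "ethical"),
     ("acceptable", "unacceptable"), ("unacceptable", "acceptable"),
     ("should", "should not"), ("should not", "should"),
     ("allowed", "prohibited"), ("prohibited", "allowed")] := by decide

-- B's per-word test characterised: it fires exactly when the word is one of the eight keys
-- and its opposite is in the second statement's word set.
set_option maxRecDepth 8192 in
lemma pvAltBody_iff (S2 : PySem.Set String) (w : String) :
    ((match PySem.Dict.get? pvOpposite w with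
      | some opposite => PySem.Set.contains S2 opposite
      | none => false) = true) ↔
      ((w = "ethical" ∧ PySem.Set.contains S2 "unethical" = true) ∨
       (w = "unethical" ∧ PySem.Set.contains S2 "ethical" = true) ∨
       (w = "acceptable" ∧ PySem.Set.contains S2 "unacceptable" = true) ∨
       (w = "unacceptable" ∧ PySem.Set.contains S2 "acceptable" = true) ∨
       (w = "should" ∧ PySem.Set.contains S2 "should not" = true) ∨
       (w = "should not" ∧ PySem.Set.contains S2 "should" = true) ∨
       (w = "allowed" ∧ PySem.Set.contains S2 "prohibited" = true) ∨
       (w = "prohibited" ∧ PySem.Set.contains S2 "allowed" = true)) := by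
  by_cases h1 : w = "ethical"
  · subst h1
    rw [show PySem.Dict.get? pvOpposite "ethical" = some "unethical" from by decide]
    simp
  by_cases h2 : w = "unethical"
  · subst h2
    rw [show PySem.Dict.get? pvOpposite "unethical" = some "ethical" from by decide]
    simp
  by_cases h3 : w = "acceptable"
  · subst h3
    rw [show PySem.Dict.get? pvOpposite "acceptable" = some "unacceptable" from by decide]
    simp
  by_cases h4 : w = "unacceptable"
  · subst h4
    rw [show PySem.Dict.get? pvOpposite "unacceptable" = some "acceptable" from by decide]
    simp
  by_cases h5 : w = "should"
  · subst h5
    rw [show PySem.Dict.get? pvOpposite "should" = some "should not" from by decide]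
    simp
  by_cases h6 : w = "should not"
  · subst h6
    rw [show PySem.Dict.get? pvOpposite "should not" = some "should" from by decide]
    simp
  by_cases h7 : w = "allowed"
  · subst h7
    rw [show PySem.Dict.get? pvOpposite "allowed" = some "prohibited" from by decide]
    simp
  by_cases h8 : w = "prohibited"
  · subst h8
    rw [show PySem.Dict.get? pvOpposite "prohibited" = some "allowed" from by decide]
    simp
  rw [show ∀ x : String, x ≠ "ethical" → x ≠ "unethical" → x ≠ "acceptable" → x ≠ "unacceptable" → x ≠ "should" → x ≠ "should not" → x ≠ "allowed" → x ≠ "prohibited" → PySem.Dict.get? pvOpposite x = none from ?_] <;> try assumption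
  · simp [h1, h2, h3, h4, h5, h6, h7, h8]
  · intro x hx1 hx2 hx3 hx4 hx5 hx6 hx7 hx8
    simp [pvOpposite_eq, PySem.Dict.get?, beq_iff_eq,
      Ne.symm hx1, Ne.symm hx2, Ne.symm hx3, Ne.symm hx4,
      Ne.symm hx5, Ne.symm hx6, Ne.symm hx7, Ne.symm hx8]

-- membership in a Python set built from a list is membership in the list
lemma pvContains_ofList (ws : List String) (w : String) :
    PySem.Set.contains (PySem.Set.ofList ws) w = true ↔ w ∈ ws := by
  simp [PySem.Set.mem_ofList]

-- the core equivalence on the word lists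
lemma pvCore (W1 W2 : List String) :
    (!(pvPairsA.any fun pn =>
        (PySem.Set.contains (PySem.Set.ofList W1) pn.1 && PySem.Set.contains (PySem.Set.ofList W2) pn.2) ||
        (PySem.Set.contains (PySem.Set.ofList W1) pn.2 && PySem.Set.contains (PySem.Set.ofList W2) pn.1))) =
    (!(W1.any fun word =>
        match PySem.Dict.get? pvOpposite word with
        | some opposite => PySem.Set.contains (PySem.Set.ofList W2) opposite
        | none => false)) := by
  apply congrArg
  rw [Bool.eq_iff_iff]
  simp only [List.any_eq_true]
  constructor
  · rintro ⟨pn, hpn, hhit⟩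
    simp only [pvPairsA, List.mem_cons, List.not_mem_nil, or_false] at hpn
    simp only [Bool.or_eq_true, Bool.and_eq_true] at hhit
    rcases hpn with h | h | h | h <;> subst h <;>
      rcases hhit with ⟨h1, h2⟩ | ⟨h1, h2⟩ <;> rw [pvContains_ofList] at h1
    · exact ⟨"ethical", h1, (pvAltBody_iff _ _).mpr (Or.inl ⟨rfl, h2⟩)⟩
    · exact ⟨"unethical", h1, (pvAltBody_iff _ _).mpr (Or.inr (Or.inl ⟨rfl, h2⟩))⟩
    · exact ⟨"acceptable", h1, (pvAltBody_iff _ _).mpr (Or.inr (Or.inr (Or.inl ⟨rfl, h2⟩)))⟩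
    · exact ⟨"unacceptable", h1, (pvAltBody_iff _ _).mpr (Or.inr (Or.inr (Or.inr (Or.inl ⟨rfl, h2⟩))))⟩
    · exact ⟨"should", h1, (pvAltBody_iff _ _).mpr (Or.inr (Or.inr (Or.inr (Or.inr (Or.inl ⟨rfl, h2⟩)))))⟩
    · exact ⟨"should not", h1, (pvAltBody_iff _ _).mpr (Or.inr (Or.inr (Or.inr (Or.inr (Or.inr (Or.inl ⟨rfl, h2⟩))))))⟩
    · exact ⟨"allowed", h1, (pvAltBody_iff _ _).mpr (Or.inr (Or.inr (Or.inr (Or.inr (Or.inr (Or.inr (Or.inl ⟨rfl, h2⟩)))))))⟩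
    · exact ⟨"prohibited", h1, (pvAltBody_iff _ _).mpr (Or.inr (Or.inr (Or.inr (Or.inr (Or.inr (Or.inr (Or.inr ⟨rfl, h2⟩)))))))⟩
  · rintro ⟨w, hw, hf⟩
    rw [pvAltBody_iff] at hf
    rw [← pvContains_ofList W1 w] at hw
    rcases hf with ⟨h, h2⟩ | ⟨h, h2⟩ | ⟨h, h2⟩ | ⟨h, h2⟩ | ⟨h, h2⟩ | ⟨h, h2⟩ | ⟨h, h2⟩ | ⟨h, h2⟩ <;>
      subst h
    · exact ⟨("ethical", "unethical"), by simp [pvPairsA], by rw [pvContains_ofList] at hw h2; simp [hw, h2]⟩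
    · exact ⟨("ethical", "unethical"), by simp [pvPairsA], by rw [pvContains_ofList] at hw h2; simp [hw, h2]⟩
    · exact ⟨("acceptable", "unacceptable"), by simp [pvPairsA], by rw [pvContains_ofList] at hw h2; simp [hw, h2]⟩
    · exact ⟨("acceptable", "unacceptable"), by simp [pvPairsA], by rw [pvContains_ofList] at hw h2; simp [hw, h2]⟩
    · exact ⟨("should", "should not"), by simp [pvPairsA], by rw [pvContains_ofList] at hw h2; simp [hw, h2]⟩
    · exact ⟨("should", "should not"), by simp [pvPairsA], by rw [pvContains_ofList] at hw h2; simp [hw, h2]⟩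
    · exact ⟨("allowed", "prohibited"), by simp [pvPairsA], by rw [pvContains_ofList] at hw h2; simp [hw, h2]⟩
    · exact ⟨("allowed", "prohibited"), by simp [pvPairsA], by rw [pvContains_ofList] at hw h2; simp [hw, h2]⟩

-- ===== VERDICT (by name: the statement is the Claim_ definition above) =====
theorem statements_consistent_py_spec : Claim_equal_statements_consistent_py := by
  intro s1 s2 _
  unfold Spec_statements_consistent_py statements_consistent_py statements_consistent_py_alt
  exact pvCore _ _
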